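-- pv_equiv track=rewrite | github.com/NiJingzhe/SimpleCADAPI | src/simplecadapi/auto_tools/make_export.py | categorize_functions
-- ===== SOURCE A (Python) =====
-- from typing import Dict, List, Mapping, Sequence, Tuple
--
-- def categorize_functions(
--     functions: Sequence[str],
--     category_rules: Mapping[str, Sequence[str]],
--     fallback_label: str = "其他",
-- ) -> Dict[str, List[str]]:
--     categorized: Dict[str, List[str]] = {name: [] for name in category_rules}
--
--     for func in functions:
--         matched = False
--         for category, prefixes in category_rules.items():
--             if any(func.startswith(prefix) for prefix in prefixes):
--                 categorized[category].append(func)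
--                 matched = True
--                 break
--         if not matched:
--             categorized.setdefault(fallback_label, []).append(func)
--
--     return {name: sorted(funcs) for name, funcs in categorized.items() if funcs}
-- ===== SOURCE B (Python) =====
-- from typing import Dict, List, Mapping, Sequence
--
-- def categorize_functions(
--     functions: Sequence[str],
--     category_rules: Mapping[str, Sequence[str]],
--     fallback_label: str = "其他",
-- ) -> Dict[str, List[str]]:
--     # Category-major pass: each category claims, in rule order, the functions no
--     # earlier category has claimed; the shrinking rest forms the fallback bucket.
--     remaining = list(functions)
--     buckets = []  # (category, functions it claims), in rule order
--     for category, prefixes in category_rules.items():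
--         picked = [f for f in remaining if any(f.startswith(p) for p in prefixes)]
--         remaining = [f for f in remaining if not any(f.startswith(p) for p in prefixes)]
--         buckets.append((category, picked))
--     leftover = remaining
--
--     result: Dict[str, List[str]] = {}
--     for category, picked in buckets:
--         entry = picked + (leftover if category == fallback_label else [])
--         if entry:
--             result[category] = sorted(entry)
--     if leftover and fallback_label not in category_rules:
--         result[fallback_label] = sorted(leftover)
--     return result
-- ===== Notes on version B (the rewrite author's own statement) =====
-- stated objective: alternative
-- what changed: A loops over functions and scans the categories for the first prefix match per function; B inverts the nesting: it loops over categories, each claiming the not-yet-assigned matching functions via an assigned-set, then forms the fallback bucket from the unclaimed rest.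
import Mathlib
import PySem

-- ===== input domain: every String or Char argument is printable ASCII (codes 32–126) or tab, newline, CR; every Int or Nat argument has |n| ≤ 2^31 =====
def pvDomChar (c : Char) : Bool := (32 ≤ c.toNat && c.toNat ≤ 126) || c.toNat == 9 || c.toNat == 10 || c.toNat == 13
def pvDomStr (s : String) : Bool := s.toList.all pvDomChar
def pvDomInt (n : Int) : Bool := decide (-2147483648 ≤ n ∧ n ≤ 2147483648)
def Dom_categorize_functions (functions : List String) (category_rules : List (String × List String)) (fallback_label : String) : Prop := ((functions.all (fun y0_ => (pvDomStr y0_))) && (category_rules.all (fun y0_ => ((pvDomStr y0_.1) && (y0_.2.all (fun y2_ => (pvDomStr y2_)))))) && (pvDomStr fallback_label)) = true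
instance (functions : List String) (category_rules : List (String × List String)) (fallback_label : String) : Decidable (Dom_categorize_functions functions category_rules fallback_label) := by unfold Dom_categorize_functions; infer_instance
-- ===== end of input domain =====

-- B replaces A's function-major loop (for each function, scan categories for the first match)
-- by a category-major loop with a set of already-claimed functions; objective: alternative decomposition.

-- ===== PORT A =====
def categorize_functions (functions : List String) (category_rules : List (String × List String)) (fallback_label : String) : List (String × List String) :=
  -- categorized = {name: [] for name in category_rules}
  let init : PySem.Dict String (List String) :=
    category_rules.foldl (fun d kv => d.insert kv.1 ([] : List String)) PySem.Dict.empty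
  -- for func in functions: inner for-with-break = find? of the first matching category;
  -- 'categorized[category].append(func)' and 'categorized.setdefault(fallback_label, []).append(func)'
  -- are both 'd[k] = d.get(k, []) + [func]' = Dict.modify k [] (· ++ [func])
  let categorized : PySem.Dict String (List String) :=
    functions.foldl (fun d func =>
      match category_rules.find? (fun kv => kv.2.any (fun pre => PySem.Str.startswith func pre)) with
      | some kv => d.modify kv.1 [] (fun l => l ++ [func])
      | none => d.modify fallback_label [] (fun l => l ++ [func])) init
  -- {name: sorted(funcs) for name, funcs in categorized.items() if funcs}
  (categorized.items.filter (fun p => !p.2.isEmpty)).map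
    (fun p => (p.1, PySem.List.sorted p.2 (fun x => x)))

-- ===== PORT B =====
def categorize_functions_alt (functions : List String) (category_rules : List (String × List String)) (fallback_label : String) : List (String × List String) :=
  -- category-major pass: each category claims the remaining functions it matches
  let st := category_rules.foldl
    (fun (st : List String × List (String × List String)) kv =>
      let picked := st.1.filter (fun f => kv.2.any (fun pre => PySem.Str.startswith f pre))
      let rest := st.1.filter (fun f => !(kv.2.any (fun pre => PySem.Str.startswith f pre)))
      (rest, st.2 ++ [(kv.1, picked)]))
    (functions, ([] : List (String × List String)))
  let leftover := st.1
  let result := st.2.foldl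
    (fun (r : PySem.Dict String (List String)) bp =>
      let entry := bp.2 ++ (if bp.1 == fallback_label then leftover else [])
      if entry.isEmpty then r else r.insert bp.1 (PySem.List.sorted entry (fun x => x)))
    PySem.Dict.empty
  let result :=
    if !leftover.isEmpty && !(category_rules.any (fun kv => kv.1 == fallback_label)) then
      result.insert fallback_label (PySem.List.sorted leftover (fun x => x))
    else result
  result.items

-- ===== PRECONDITION & SPEC =====
-- Pre_ excludes association lists with duplicate category keys: A takes category_rules as a
-- Python Mapping, which cannot hold duplicate keys, so such lists represent no Python input.
def Pre_categorize_functions (functions : List String) (category_rules : List (String × List String)) (fallback_label : String) : Prop :=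
  (category_rules.map Prod.fst).Nodup
instance (functions : List String) (category_rules : List (String × List String)) (fallback_label : String) : Decidable (Pre_categorize_functions functions category_rules fallback_label) := by unfold Pre_categorize_functions; infer_instance

def pvWitness_categorize_functions : List String × (List (String × List String)) × String :=
  (["foo_a", "bar_b", "zzz"], [("foo", ["foo_"]), ("bar", ["bar_"])], "misc")

def Spec_categorize_functions (functions : List String) (category_rules : List (String × List String)) (fallback_label : String) (out : List (String × List String)) : Prop := out = categorize_functions_alt functions category_rules fallback_label
instance (functions : List String) (category_rules : List (String × List String)) (fallback_label : String) (out : List (String × List String)) : Decidable (Spec_categorize_functions functions category_rules fallback_label out) := by unfold Spec_categorize_functions; infer_instance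

-- ===== CLAIM (what is proved, stated in full; the proofs are below) =====
def Claim_equal_categorize_functions : Prop := ∀ (functions : List String) (category_rules : List (String × List String)) (fallback_label : String), Dom_categorize_functions functions category_rules fallback_label → Pre_categorize_functions functions category_rules fallback_label → Spec_categorize_functions functions category_rules fallback_label (categorize_functions functions category_rules fallback_label)

-- ===== LEMMAS AND PROOFS =====

-- f matches the prefix list ps
def pvMatches (f : String) (ps : List String) : Bool := ps.any (fun pre => PySem.Str.startswith f pre)

-- f is matched by some rule of rs
def pvMB (rs : List (String × List String)) (f : String) : Bool := rs.any (fun kv => pvMatches f kv.2)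

-- the key A files f under
def pvKeyOf (rules : List (String × List String)) (fb f : String) : String :=
  match rules.find? (fun kv => pvMatches f kv.2) with
  | some kv => kv.1
  | none => fb

theorem pvMB_append (rs₁ rs₂ : List (String × List String)) (f : String) :
    pvMB (rs₁ ++ rs₂) f = (pvMB rs₁ f || pvMB rs₂ f) := by
  simp [pvMB, List.any_append]


theorem filter_or_perm {α : Type} (l : List α) (p q : α → Bool)
    (h : ∀ x ∈ l, ¬(p x = true ∧ q x = true)) :
    (l.filter (fun x => p x || q x)).Perm (l.filter p ++ l.filter q) := by
  induction l with
  | nil => simp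
  | cons x t ih =>
    have ht := ih (fun y hy => h y (List.mem_cons_of_mem _ hy))
    by_cases hp : p x = true
    · have hq : q x = false := by
        have := h x (List.mem_cons_self ..)
        cases hq' : q x <;> simp_all
      simpa [hp, hq] using ht.cons x
    · cases hq : q x
      · simpa [hp, hq] using ht
      · simp only [List.filter_cons, hp, hq]
        simp only [Bool.false_or, cond_true, decide_true, if_true]
        exact (ht.cons x).trans (List.perm_middle).symm

theorem set_update_of_subset {α : Type} [BEq α] [LawfulBEq α] (s : PySem.Set α) (l : List α)
    (h : ∀ x ∈ l, x ∈ s) : PySem.Set.update s l = s := by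
  induction l generalizing s with
  | nil => rfl
  | cons x t ih =>
    have hx : x ∈ s := h x (List.mem_cons_self ..)
    have : PySem.Set.add s x = s := by
      simp [PySem.Set.add, PySem.Set.contains, hx]
    simp only [PySem.Set.update, List.foldl_cons]
    rw [show List.foldl PySem.Set.add (PySem.Set.add s x) t = PySem.Set.update (PySem.Set.add s x) t from rfl]
    rw [this]
    exact ih s (fun y hy => h y (List.mem_cons_of_mem _ hy))

theorem set_update_shape (s : List String) (a : String) (l : List String)
    (h : ∀ x ∈ l, x ∈ s ∨ x = a) :
    PySem.Set.update s l = s ++ (if a ∈ s ∨ a ∉ l then [] else [a]) := by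
  by_cases ha : a ∈ s ∨ a ∉ l
  · rw [if_pos ha]
    simp only [List.append_nil]
    apply set_update_of_subset
    intro x hx
    rcases h x hx with hxs | rfl
    · exact hxs
    · rcases ha with h1 | h2
      · exact h1
      · exact absurd hx h2
  · rw [if_neg ha]
    push_neg at ha
    obtain ⟨has, hal⟩ := ha
    -- a ∉ s, a ∈ l
    induction l generalizing s with
    | nil => simp at hal
    | cons x t ih =>
      simp only [PySem.Set.update, List.foldl_cons]
      rcases h x (List.mem_cons_self ..) with hxs | rfl
      · have hadd : PySem.Set.add s x = s := by simp [PySem.Set.add, PySem.Set.contains, hxs]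
        rw [hadd]
        rcases List.mem_cons.mp hal with rfl | hat
        · exact absurd hxs has
        · apply ih <;> first
          | exact has | exact hat | exact (fun y hy => h y (List.mem_cons_of_mem _ hy))
      · have hadd : PySem.Set.add s x = s ++ [x] := by simp [PySem.Set.add, PySem.Set.contains, has]
        rw [hadd]
        rw [show List.foldl PySem.Set.add (s ++ [x]) t = PySem.Set.update (s ++ [x]) t from rfl]
        apply set_update_of_subset
        intro y hy
        rcases h y (List.mem_cons_of_mem _ hy) with hys | rfl
        · exact List.mem_append_left _ hys
        · exact List.mem_append_right _ (List.mem_singleton_self _)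

-- init dict facts
theorem initA_items (category_rules : List (String × List String))
    (hnd : (category_rules.map Prod.fst).Nodup) :
    (category_rules.foldl (fun d kv => d.insert kv.1 ([] : List String)) PySem.Dict.empty).items
      = category_rules.map (fun kv => (kv.1, ([] : List String))) := by
  have := PySem.Dict.items_foldl_insert_fresh category_rules Prod.fst
      (fun _ => ([] : List String)) PySem.Dict.empty
      (fun a _ => PySem.Dict.contains_empty _) hnd
  simpa using this

theorem initA_keys (category_rules : List (String × List String))
    (hnd : (category_rules.map Prod.fst).Nodup) :
    (category_rules.foldl (fun d kv => d.insert kv.1 ([] : List String)) PySem.Dict.empty).keys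
      = category_rules.map Prod.fst := by
  simp only [PySem.Dict.keys, initA_items _ hnd, List.map_map]
  rfl

theorem initA_getD (category_rules : List (String × List String))
    (hnd : (category_rules.map Prod.fst).Nodup) (c : String) :
    (category_rules.foldl (fun d kv => d.insert kv.1 ([] : List String)) PySem.Dict.empty).getD c []
      = [] := by
  set d := category_rules.foldl (fun d kv => d.insert kv.1 ([] : List String)) PySem.Dict.empty with hd
  by_cases hc : d.contains c = true
  · have hkn : d.keys.Nodup := by
      rw [initA_keys _ hnd]; exact hnd
    have : c ∈ d.keys := (PySem.Dict.contains_iff_mem_keys _ _).mp hc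
    rw [initA_keys _ hnd] at this
    obtain ⟨kv, hkv, rfl⟩ := List.mem_map.mp this
    have hmem : (kv.1, ([] : List String)) ∈ d.items := by
      rw [initA_items _ hnd]
      exact List.mem_map.mpr ⟨kv, hkv, rfl⟩
    exact PySem.Dict.getD_of_mem_items _ hmem hkn _
  · exact PySem.Dict.getD_of_not_contains _ _ (by simpa using hc)

-- the step of A's functions-loop is a modify keyed by pvKeyOf
theorem stepA_eq (category_rules : List (String × List String)) (fallback_label : String)
    (d : PySem.Dict String (List String)) (func : String) :
    (match category_rules.find? (fun kv => kv.2.any (fun pre => PySem.Str.startswith func pre)) with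
      | some kv => d.modify kv.1 [] (fun l => l ++ [func])
      | none => d.modify fallback_label [] (fun l => l ++ [func]))
    = d.modify (pvKeyOf category_rules fallback_label func) [] (fun l => l ++ [func]) := by
  unfold pvKeyOf pvMatches
  cases category_rules.find? (fun kv => kv.2.any (fun pre => PySem.Str.startswith func pre)) <;> rfl


-- fold over functions as a modify-fold over (key, value) pairs
theorem loopA_as_pairs (functions : List String) (category_rules : List (String × List String))
    (fallback_label : String) (init : PySem.Dict String (List String)) :
    functions.foldl (fun d func =>
      match category_rules.find? (fun kv => kv.2.any (fun pre => PySem.Str.startswith func pre)) with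
      | some kv => d.modify kv.1 [] (fun l => l ++ [func])
      | none => d.modify fallback_label [] (fun l => l ++ [func])) init
    = (functions.map (fun f => (pvKeyOf category_rules fallback_label f, f))).foldl
        (fun d p => d.modify p.1 [] (fun l => l ++ [p.2])) init := by
  rw [List.foldl_map]
  apply PySem.List.foldl_congr_mem
  intro d func _
  exact stepA_eq category_rules fallback_label d func

theorem loopA_getD (functions : List String) (category_rules : List (String × List String))
    (fallback_label : String) (hnd : (category_rules.map Prod.fst).Nodup) (c : String) :
    ((functions.map (fun f => (pvKeyOf category_rules fallback_label f, f))).foldl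
        (fun d p => d.modify p.1 [] (fun l => l ++ [p.2]))
        (category_rules.foldl (fun d kv => d.insert kv.1 ([] : List String)) PySem.Dict.empty)).getD c []
    = functions.filter (fun f => pvKeyOf category_rules fallback_label f == c) := by
  rw [PySem.Dict.getD_foldl_modify_append, initA_getD _ hnd]
  simp [List.filter_map, Function.comp_def, List.map_map]

theorem pvKeyOf_mem_or (rules : List (String × List String)) (fb f : String) :
    pvKeyOf rules fb f ∈ rules.map Prod.fst ∨ pvKeyOf rules fb f = fb := by
  unfold pvKeyOf
  cases hf : rules.find? (fun kv => pvMatches f kv.2) with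
  | none => exact Or.inr rfl
  | some kv => exact Or.inl (List.mem_map.mpr ⟨kv, List.mem_of_find?_eq_some hf, rfl⟩)

theorem loopA_keys (functions : List String) (category_rules : List (String × List String))
    (fallback_label : String) (hnd : (category_rules.map Prod.fst).Nodup) :
    ((functions.map (fun f => (pvKeyOf category_rules fallback_label f, f))).foldl
        (fun d p => d.modify p.1 [] (fun l => l ++ [p.2]))
        (category_rules.foldl (fun d kv => d.insert kv.1 ([] : List String)) PySem.Dict.empty)).keys
    = PySem.Set.update (category_rules.map Prod.fst)
        (functions.map (pvKeyOf category_rules fallback_label)) := by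
  rw [PySem.Dict.keys_foldl_modify_key _ Prod.fst [] (fun _ p => (fun l => l ++ [p.2]))]
  rw [initA_keys _ hnd, List.map_map]
  rfl

theorem loopA_keys_shape (functions : List String) (category_rules : List (String × List String))
    (fallback_label : String) (hnd : (category_rules.map Prod.fst).Nodup) :
    PySem.Set.update (category_rules.map Prod.fst)
        (functions.map (pvKeyOf category_rules fallback_label))
    = category_rules.map Prod.fst ++
        (if fallback_label ∈ category_rules.map Prod.fst ∨
            fallback_label ∉ functions.map (pvKeyOf category_rules fallback_label)
         then [] else [fallback_label]) := by
  apply set_update_shape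
  intro x hx
  obtain ⟨f, _, rfl⟩ := List.mem_map.mp hx
  exact pvKeyOf_mem_or _ _ _

def pvSpec (functions : List String) : List (String × List String) → List (String × List String) → List (String × List String)
  | _, [] => []
  | done, kv :: rest =>
    (kv.1, functions.filter (fun f => !pvMB done f && pvMatches f kv.2)) :: pvSpec functions (done ++ [kv]) rest

theorem loopB (functions : List String) (rs : List (String × List String)) :
    ∀ (done bs : List (String × List String)),
    (rs.foldl (fun (st : List String × List (String × List String)) kv =>
        let picked := st.1.filter (fun f => kv.2.any (fun pre => PySem.Str.startswith f pre))
        let rest := st.1.filter (fun f => !(kv.2.any (fun pre => PySem.Str.startswith f pre)))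
        (rest, st.2 ++ [(kv.1, picked)]))
      (functions.filter (fun f => !pvMB done f), bs))
    = (functions.filter (fun f => !pvMB (done ++ rs) f), bs ++ pvSpec functions done rs) := by
  induction rs with
  | nil =>
    intro done bs
    simp [pvSpec]
  | cons kv rest ih =>
    intro done bs
    simp only [List.foldl_cons]
    have hpick : (functions.filter (fun f => !pvMB done f)).filter
        (fun f => kv.2.any (fun pre => PySem.Str.startswith f pre))
        = functions.filter (fun f => !pvMB done f && pvMatches f kv.2) := by
      rw [List.filter_filter]
      apply List.filter_congr
      intro f _
      cases pvMB done f <;> simp [pvMatches]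
    have hrest : (functions.filter (fun f => !pvMB done f)).filter
        (fun f => !(kv.2.any (fun pre => PySem.Str.startswith f pre)))
        = functions.filter (fun f => !pvMB (done ++ [kv]) f) := by
      rw [List.filter_filter]
      apply List.filter_congr
      intro f _
      rw [pvMB_append]
      cases pvMB done f <;> simp [pvMB, pvMatches]
    rw [hpick, hrest, ih (done ++ [kv])]
    rw [show (done ++ [kv]) ++ rest = done ++ kv :: rest by simp]
    rw [pvSpec, List.append_assoc]
    rfl

def pvEntry (lo : List String) (fb : String) (bp : String × List String) : List String :=
  bp.2 ++ (if bp.1 == fb then lo else [])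

theorem pvSpec_keys (functions : List String) :
    ∀ (rest done : List (String × List String)),
    (pvSpec functions done rest).map Prod.fst = rest.map Prod.fst := by
  intro rest
  induction rest with
  | nil => intro done; rfl
  | cons kv t ih => intro done; simp [pvSpec, ih]

theorem loopRes (lo : List String) (fb : String) :
    ∀ (bs : List (String × List String)) (d : PySem.Dict String (List String)),
    (∀ bp ∈ bs, d.contains bp.1 = false) → (bs.map Prod.fst).Nodup →
    (bs.foldl (fun (r : PySem.Dict String (List String)) bp =>
        let entry := bp.2 ++ (if bp.1 == fb then lo else [])
        if entry.isEmpty then r else r.insert bp.1 (PySem.List.sorted entry (fun x => x))) d).items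
      = d.items ++ bs.flatMap (fun bp =>
          if (pvEntry lo fb bp).isEmpty then []
          else [(bp.1, PySem.List.sorted (pvEntry lo fb bp) (fun x => x))]) := by
  intro bs
  induction bs with
  | nil => intro d _ _; simp
  | cons bp t ih =>
    intro d hfresh hnd
    simp only [List.foldl_cons, List.flatMap_cons]
    have hm : bp.1 ∉ List.map Prod.fst t ∧ (List.map Prod.fst t).Nodup := by
      have h := hnd; simp only [List.map_cons, List.nodup_cons] at h; exact h
    by_cases he : (pvEntry lo fb bp).isEmpty
    · have he'' : (bp.2 ++ (if bp.1 == fb then lo else [])).isEmpty = true := by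
        simpa [pvEntry] using he
      rw [if_pos he'']
      rw [ih d (fun q hq => hfresh q (List.mem_cons_of_mem _ hq)) hm.2]
      simp [he]
    · have he' : ¬ (bp.2 ++ (if bp.1 == fb then lo else [])).isEmpty = true := by
        simpa [pvEntry] using he
      rw [show (if (bp.2 ++ (if bp.1 == fb then lo else [])).isEmpty then d
            else d.insert bp.1 (PySem.List.sorted (bp.2 ++ (if bp.1 == fb then lo else [])) (fun x => x)))
          = d.insert bp.1 (PySem.List.sorted (pvEntry lo fb bp) (fun x => x)) by
          simp only [pvEntry]; rw [if_neg he']]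
      have hfresh' : ∀ q ∈ t, (d.insert bp.1 (PySem.List.sorted (pvEntry lo fb bp) (fun x => x))).contains q.1 = false := by
        intro q hq
        rw [PySem.Dict.contains_insert]
        have h1 : (q.1 == bp.1) = false := by
          simp only [beq_eq_false_iff_ne, ne_eq]
          intro hqe
          exact hm.1 (by rw [← hqe]; exact List.mem_map.mpr ⟨q, hq, rfl⟩)
        rw [h1, hfresh q (List.mem_cons_of_mem _ hq)]; rfl
      rw [ih _ hfresh' hm.2]
      rw [PySem.Dict.items_insert_of_not_contains _ _ (hfresh bp (List.mem_cons_self ..))]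
      simp [he]

theorem loopRes_contains (lo : List String) (fb : String) :
    ∀ (bs : List (String × List String)) (d : PySem.Dict String (List String)) (k : String),
    (bs.foldl (fun (r : PySem.Dict String (List String)) bp =>
        let entry := bp.2 ++ (if bp.1 == fb then lo else [])
        if entry.isEmpty then r else r.insert bp.1 (PySem.List.sorted entry (fun x => x))) d).contains k = true →
    d.contains k = true ∨ k ∈ bs.map Prod.fst := by
  intro bs
  induction bs with
  | nil => intro d k h; exact Or.inl h
  | cons bp t ih =>
    intro d k h
    simp only [List.foldl_cons] at h
    by_cases he : (bp.2 ++ (if bp.1 == fb then lo else [])).isEmpty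
    · rw [if_pos he] at h
      rcases ih d k h with h1 | h2
      · exact Or.inl h1
      · exact Or.inr (List.mem_cons_of_mem _ h2)
    · rw [if_neg he] at h
      rcases ih _ k h with h1 | h2
      · rw [PySem.Dict.contains_insert] at h1
        rcases Bool.or_eq_true_iff.mp h1 with hk | hk
        · exact Or.inr (by simp [List.mem_cons]; left; exact beq_iff_eq.mp hk)
        · exact Or.inl hk
      · exact Or.inr (List.mem_cons_of_mem _ h2)


theorem pvMB_eq_isSome (rs : List (String × List String)) (f : String) :
    pvMB rs f = (rs.find? (fun kv => pvMatches f kv.2)).isSome := by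
  induction rs with
  | nil => rfl
  | cons kv t ih =>
    simp only [pvMB, List.any_cons, List.find?_cons]
    cases h : pvMatches f kv.2 <;> simp [pvMB] at ih ⊢ <;> simp [ih]

theorem keyOf_eq_iff (done rest : List (String × List String)) (kv : String × List String)
    (fb f : String) (hnd : ((done ++ kv :: rest).map Prod.fst).Nodup) :
    (pvKeyOf (done ++ kv :: rest) fb f == kv.1)
      = ((!pvMB done f && pvMatches f kv.2) || (kv.1 == fb && !pvMB (done ++ kv :: rest) f)) := by
  have hsplit : kv.1 ∉ done.map Prod.fst ∧ kv.1 ∉ rest.map Prod.fst := by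
    simp only [List.map_append, List.map_cons, List.nodup_append] at hnd
    obtain ⟨h1, h2, h3⟩ := hnd
    constructor
    · intro hmem
      exact (h3 kv.1 hmem) kv.1 (by simp) rfl
    · exact (List.nodup_cons.mp h2).1
  unfold pvKeyOf
  rw [List.find?_append]
  cases hd : done.find? (fun kv => pvMatches f kv.2) with
  | some kv' =>
    have hk' : kv'.1 ≠ kv.1 := by
      intro hEq
      exact hsplit.1 (hEq ▸ List.mem_map.mpr ⟨kv', List.mem_of_find?_eq_some hd, rfl⟩)
    have hmb : pvMB done f = true := by rw [pvMB_eq_isSome, hd]; rfl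
    have hmbAll : pvMB (done ++ kv :: rest) f = true := by
      rw [pvMB_append, hmb]; rfl
    simp [hk', hmb, hmbAll]
  | none =>
    have hmb : pvMB done f = false := by rw [pvMB_eq_isSome, hd]; rfl
    simp only [Option.none_or, List.find?_cons]
    cases hm : pvMatches f kv.2 with
    | true =>
      have : pvMB (done ++ kv :: rest) f = true := by
        rw [pvMB_append]; simp [pvMB, hm]
      simp [hmb, hm, this]
    | false =>
      cases hr : rest.find? (fun kv => pvMatches f kv.2) with
      | some kv'' =>
        have hk'' : kv''.1 ≠ kv.1 := by
          intro hEq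
          exact hsplit.2 (hEq ▸ List.mem_map.mpr ⟨kv'', List.mem_of_find?_eq_some hr, rfl⟩)
        have : pvMB (done ++ kv :: rest) f = true := by
          rw [pvMB_append]
          have : pvMB (kv :: rest) f = true := by
            simp only [pvMB, List.any_cons]
            have : pvMB rest f = true := by rw [pvMB_eq_isSome, hr]; rfl
            simp [pvMB] at this
            simp [this]
          simp [this]
        simp [hk'', hmb, hm, this]
      | none =>
        have : pvMB (done ++ kv :: rest) f = false := by
          rw [pvMB_append, hmb]
          simp only [pvMB, List.any_cons, hm, Bool.false_or]
          rw [show rest.any (fun kv => pvMatches f kv.2) = pvMB rest f from rfl,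
            pvMB_eq_isSome, hr]
          rfl
        simp [hmb, hm, this, BEq.comm]

theorem bucket_perm_entry (functions : List String) (done rest : List (String × List String))
    (kv : String × List String) (fb : String)
    (hnd : ((done ++ kv :: rest).map Prod.fst).Nodup) :
    (functions.filter (fun f => pvKeyOf (done ++ kv :: rest) fb f == kv.1)).Perm
      (pvEntry (functions.filter (fun f => !pvMB (done ++ kv :: rest) f)) fb
        (kv.1, functions.filter (fun f => !pvMB done f && pvMatches f kv.2))) := by
  have hcongr : functions.filter (fun f => pvKeyOf (done ++ kv :: rest) fb f == kv.1)
      = functions.filter (fun f =>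
          (!pvMB done f && pvMatches f kv.2) || (kv.1 == fb && !pvMB (done ++ kv :: rest) f)) := by
    apply List.filter_congr
    intro f _
    exact keyOf_eq_iff done rest kv fb f hnd
  rw [hcongr]
  have hdisj : ∀ f ∈ functions,
      ¬((!pvMB done f && pvMatches f kv.2) = true ∧ (kv.1 == fb && !pvMB (done ++ kv :: rest) f) = true) := by
    intro f _ ⟨h1, h2⟩
    have hmatch : pvMatches f kv.2 = true := (Bool.and_eq_true_iff.mp h1).2
    have hmb : pvMB (done ++ kv :: rest) f = true := by
      rw [pvMB_append]
      simp [pvMB, hmatch]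
    rw [hmb] at h2
    simp at h2
  have := filter_or_perm functions _ _ hdisj
  refine this.trans ?_
  unfold pvEntry
  simp only
  apply List.Perm.append_left
  cases hfb : (kv.1 == fb) with
  | true =>
    apply List.Perm.of_eq
    apply List.filter_congr
    intro f _
    simp [hfb]
  | false =>
    simp [hfb]

theorem mainList (functions : List String) (rules : List (String × List String)) (fb : String)
    (hnd : (rules.map Prod.fst).Nodup) :
    ∀ (rest done : List (String × List String)), rules = done ++ rest →
    ((rest.map (fun kv => (kv.1, functions.filter (fun f => pvKeyOf rules fb f == kv.1)))).filter
        (fun p => !p.2.isEmpty)).map (fun p => (p.1, PySem.List.sorted p.2 (fun x => x)))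
      = (pvSpec functions done rest).flatMap (fun bp =>
          if (pvEntry (functions.filter (fun f => !pvMB rules f)) fb bp).isEmpty then []
          else [(bp.1, PySem.List.sorted
            (pvEntry (functions.filter (fun f => !pvMB rules f)) fb bp) (fun x => x))]) := by
  intro rest
  induction rest with
  | nil => intro done h; rfl
  | cons kv rest' ih =>
    intro done h
    have hperm := bucket_perm_entry functions done rest' kv fb (h ▸ hnd)
    rw [← h] at hperm
    simp only [List.map_cons, List.filter_cons, pvSpec, List.flatMap_cons]
    have hrec := ih (done ++ [kv]) (by rw [h, List.append_assoc]; rfl)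
    by_cases hb : (functions.filter (fun f => pvKeyOf rules fb f == kv.1)).isEmpty
    · have hbe : functions.filter (fun f => pvKeyOf rules fb f == kv.1) = [] :=
        List.isEmpty_iff.mp hb
      have hee : pvEntry (functions.filter (fun f => !pvMB rules f)) fb
          (kv.1, functions.filter (fun f => !pvMB done f && pvMatches f kv.2)) = [] := by
        rw [hbe] at hperm
        exact hperm.symm.eq_nil
      rw [hee]
      simp only [hb, Bool.not_true, List.isEmpty_nil, if_true, List.nil_append]
      simpa using hrec
    · have hee : ¬ (pvEntry (functions.filter (fun f => !pvMB rules f)) fb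
          (kv.1, functions.filter (fun f => !pvMB done f && pvMatches f kv.2))).isEmpty = true := by
        intro hc
        exact hb (List.isEmpty_iff.mpr (by
          have := List.isEmpty_iff.mp hc
          rw [this] at hperm
          exact hperm.eq_nil))
      have hsorted : PySem.List.sorted (functions.filter (fun f => pvKeyOf rules fb f == kv.1)) (fun x => x)
          = PySem.List.sorted (pvEntry (functions.filter (fun f => !pvMB rules f)) fb
              (kv.1, functions.filter (fun f => !pvMB done f && pvMatches f kv.2))) (fun x => x) :=
        PySem.List.sorted_eq_sorted_of_perm _ _ _ (fun a b hab => hab) hperm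
      have hbf : (functions.filter (fun f => pvKeyOf rules fb f == kv.1)).isEmpty = false := by
        cases h' : (functions.filter (fun f => pvKeyOf rules fb f == kv.1)).isEmpty
        · rfl
        · exact absurd h' hb
      rw [if_neg hee]
      simp only [hbf, Bool.not_false, if_true]
      rw [List.map_cons, hsorted, hrec]
      rfl


theorem keyOf_eq_fb_iff (rules : List (String × List String)) (fb f : String)
    (hout : fb ∉ rules.map Prod.fst) :
    (pvKeyOf rules fb f == fb) = !pvMB rules f := by
  unfold pvKeyOf
  rw [pvMB_eq_isSome]
  cases hf : rules.find? (fun kv => pvMatches f kv.2) with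
  | none => simp
  | some kv =>
    have hne : kv.1 ≠ fb := fun hEq =>
      hout (hEq ▸ List.mem_map.mpr ⟨kv, List.mem_of_find?_eq_some hf, rfl⟩)
    simp [hne]

theorem portA_char (functions : List String) (category_rules : List (String × List String))
    (fallback_label : String) (hpre : (category_rules.map Prod.fst).Nodup) :
    categorize_functions functions category_rules fallback_label
      = ((category_rules.map (fun kv =>
            (kv.1, functions.filter (fun f => pvKeyOf category_rules fallback_label f == kv.1)))).filter
              (fun p => !p.2.isEmpty)).map (fun p => (p.1, PySem.List.sorted p.2 (fun x => x)))
        ++ (if fallback_label ∈ category_rules.map Prod.fst ∨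
              fallback_label ∉ functions.map (pvKeyOf category_rules fallback_label) then []
            else [(fallback_label, PySem.List.sorted
              (functions.filter (fun f => pvKeyOf category_rules fallback_label f == fallback_label)) (fun x => x))]) := by
  have hA : categorize_functions functions category_rules fallback_label
      = ((functions.foldl (fun d func =>
          match category_rules.find? (fun kv => kv.2.any (fun pre => PySem.Str.startswith func pre)) with
          | some kv => d.modify kv.1 [] (fun l => l ++ [func])
          | none => d.modify fallback_label [] (fun l => l ++ [func]))
          (category_rules.foldl (fun d kv => d.insert kv.1 ([] : List String)) PySem.Dict.empty)).items.filter
            (fun p => !p.2.isEmpty)).map (fun p => (p.1, PySem.List.sorted p.2 (fun x => x))) := rfl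
  rw [hA, loopA_as_pairs]
  have hknodup : ((functions.map (fun f => (pvKeyOf category_rules fallback_label f, f))).foldl
      (fun d p => d.modify p.1 [] (fun l => l ++ [p.2]))
      (category_rules.foldl (fun d kv => d.insert kv.1 ([] : List String)) PySem.Dict.empty)).keys.Nodup := by
    apply PySem.Dict.nodup_keys_foldl_modify_key
    rw [initA_keys _ hpre]; exact hpre
  rw [PySem.Dict.items_eq_map_keys _ hknodup []]
  have hmapcongr : ∀ ks : List String, ks.map (fun k =>
      (k, ((functions.map (fun f => (pvKeyOf category_rules fallback_label f, f))).foldl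
        (fun d p => d.modify p.1 [] (fun l => l ++ [p.2]))
        (category_rules.foldl (fun d kv => d.insert kv.1 ([] : List String)) PySem.Dict.empty)).getD k []))
      = ks.map (fun k => (k, functions.filter (fun f => pvKeyOf category_rules fallback_label f == k))) := by
    intro ks
    apply List.map_congr_left
    intro k _
    rw [loopA_getD _ _ _ hpre]
  rw [hmapcongr]
  rw [loopA_keys _ _ _ hpre, loopA_keys_shape _ _ _ hpre]
  rw [List.map_append, List.filter_append, List.map_append]
  congr 1
  · rw [List.map_map]; rfl
  · by_cases hc : fallback_label ∈ category_rules.map Prod.fst ∨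
        fallback_label ∉ functions.map (pvKeyOf category_rules fallback_label)
    · rw [if_pos hc, if_pos hc]; rfl
    · rw [if_neg hc, if_neg hc]
      push_neg at hc
      obtain ⟨hout, hin⟩ := hc
      have hne : functions.filter
          (fun f => pvKeyOf category_rules fallback_label f == fallback_label) ≠ [] := by
        obtain ⟨f, hf, hkey⟩ := List.mem_map.mp hin
        intro hnil
        have hmem : f ∈ functions.filter
            (fun f => pvKeyOf category_rules fallback_label f == fallback_label) :=
          List.mem_filter.mpr ⟨hf, by rw [hkey]; exact beq_self_eq_true _⟩
        rw [hnil] at hmem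
        exact List.not_mem_nil hmem
      have hnb : (functions.filter
          (fun f => pvKeyOf category_rules fallback_label f == fallback_label)).isEmpty = false := by
        cases h' : (functions.filter
            (fun f => pvKeyOf category_rules fallback_label f == fallback_label)).isEmpty
        · rfl
        · exact absurd (List.isEmpty_iff.mp h') hne
      simp [hnb]


theorem portB_char (functions : List String) (category_rules : List (String × List String))
    (fallback_label : String) (hpre : (category_rules.map Prod.fst).Nodup) :
    categorize_functions_alt functions category_rules fallback_label
      = (pvSpec functions [] category_rules).flatMap (fun bp =>
          if (pvEntry (functions.filter (fun f => !pvMB category_rules f)) fallback_label bp).isEmpty then []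
          else [(bp.1, PySem.List.sorted
            (pvEntry (functions.filter (fun f => !pvMB category_rules f)) fallback_label bp) (fun x => x))])
        ++ (if (!(functions.filter (fun f => !pvMB category_rules f)).isEmpty
              && !(category_rules.any (fun kv => kv.1 == fallback_label))) then
            [(fallback_label, PySem.List.sorted
              (functions.filter (fun f => !pvMB category_rules f)) (fun x => x))]
          else []) := by
  have hstart : functions = functions.filter
      (fun f => !pvMB ([] : List (String × List String)) f) := by
    simp [pvMB]
  unfold categorize_functions_alt
  dsimp only
  conv_lhs => rw [hstart]
  rw [loopB functions category_rules [] []]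
  dsimp only
  simp only [List.nil_append]
  have hnodup : ((pvSpec functions [] category_rules).map Prod.fst).Nodup := by
    rw [pvSpec_keys]; exact hpre
  have hfresh : ∀ bp ∈ pvSpec functions [] category_rules,
      (PySem.Dict.empty : PySem.Dict String (List String)).contains bp.1 = false :=
    fun bp _ => PySem.Dict.contains_empty _
  by_cases hcond : (!(functions.filter (fun f => !pvMB category_rules f)).isEmpty
      && !(category_rules.any (fun kv => kv.1 == fallback_label))) = true
  · rw [if_pos hcond, if_pos hcond]
    have hnc : ((pvSpec functions [] category_rules).foldl
        (fun (r : PySem.Dict String (List String)) bp =>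
          let entry := bp.2 ++ (if bp.1 == fallback_label then
            functions.filter (fun f => !pvMB category_rules f) else [])
          if entry.isEmpty then r else r.insert bp.1 (PySem.List.sorted entry (fun x => x)))
        PySem.Dict.empty).contains fallback_label = false := by
      cases hc : ((pvSpec functions [] category_rules).foldl
          (fun (r : PySem.Dict String (List String)) bp =>
            let entry := bp.2 ++ (if bp.1 == fallback_label then
              functions.filter (fun f => !pvMB category_rules f) else [])
            if entry.isEmpty then r else r.insert bp.1 (PySem.List.sorted entry (fun x => x)))
          PySem.Dict.empty).contains fallback_label
      · rfl
      · exfalso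
        rcases loopRes_contains (functions.filter (fun f => !pvMB category_rules f)) fallback_label
            (pvSpec functions [] category_rules) PySem.Dict.empty fallback_label hc with hx | hx
        · rw [PySem.Dict.contains_empty] at hx
          exact Bool.false_ne_true hx
        · rw [pvSpec_keys] at hx
          have hany : category_rules.any (fun kv => kv.1 == fallback_label) = true := by
            obtain ⟨kv, hkv, hEq⟩ := List.mem_map.mp hx
            exact List.any_eq_true.mpr ⟨kv, hkv, by rw [hEq]; exact beq_self_eq_true _⟩
          rw [hany] at hcond
          simp at hcond
    rw [PySem.Dict.items_insert_of_not_contains _ _ hnc]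
    rw [loopRes _ _ _ _ hfresh hnodup]
    simp [show (PySem.Dict.empty : PySem.Dict String (List String)).items = [] from rfl]
  · rw [if_neg hcond, if_neg hcond]
    rw [loopRes _ _ _ _ hfresh hnodup]
    simp [show (PySem.Dict.empty : PySem.Dict String (List String)).items = [] from rfl]

-- ===== VERDICT (by name: the statement is the Claim_ definition above) =====
theorem categorize_functions_spec : Claim_equal_categorize_functions := by
  intro functions category_rules fallback_label _hdom hpre
  unfold Spec_categorize_functions
  have hpre' : (category_rules.map Prod.fst).Nodup := hpre
  rw [portA_char _ _ _ hpre', portB_char _ _ _ hpre']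
  rw [mainList functions category_rules fallback_label hpre' category_rules [] rfl]
  congr 1
  by_cases hin : fallback_label ∈ category_rules.map Prod.fst
  · have hany : category_rules.any (fun kv => kv.1 == fallback_label) = true := by
      obtain ⟨kv, hkv, hEq⟩ := List.mem_map.mp hin
      exact List.any_eq_true.mpr ⟨kv, hkv, by rw [hEq]; exact beq_self_eq_true _⟩
    rw [if_pos (Or.inl hin)]
    simp [hany]
  · have hany : category_rules.any (fun kv => kv.1 == fallback_label) = false := by
      rw [List.any_eq_false]
      intro kv hkv hc
      exact hin (List.mem_map.mpr ⟨kv, hkv, beq_iff_eq.mp hc⟩)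
    have hbucket : functions.filter
        (fun f => pvKeyOf category_rules fallback_label f == fallback_label)
        = functions.filter (fun f => !pvMB category_rules f) :=
      List.filter_congr (fun f _ => keyOf_eq_fb_iff category_rules fallback_label f hin)
    by_cases hlo : functions.filter (fun f => !pvMB category_rules f) = []
    · have hnotin : fallback_label ∉ functions.map (pvKeyOf category_rules fallback_label) := by
        intro hmem
        obtain ⟨f, hf, hkey⟩ := List.mem_map.mp hmem
        have hbeq : (pvKeyOf category_rules fallback_label f == fallback_label) = true := by
          rw [hkey]; exact beq_self_eq_true _
        rw [keyOf_eq_fb_iff category_rules fallback_label f hin] at hbeq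
        have : f ∈ functions.filter (fun f => !pvMB category_rules f) :=
          List.mem_filter.mpr ⟨hf, hbeq⟩
        rw [hlo] at this
        exact List.not_mem_nil this
      rw [if_pos (Or.inr hnotin)]
      simp [hlo]
    · have hmem : fallback_label ∈ functions.map (pvKeyOf category_rules fallback_label) := by
        obtain ⟨f, hf⟩ := List.exists_mem_of_ne_nil _ hlo
        have hf' := List.mem_filter.mp hf
        have hbeq := keyOf_eq_fb_iff category_rules fallback_label f hin
        rw [hf'.2] at hbeq
        exact List.mem_map.mpr ⟨f, hf'.1, beq_iff_eq.mp hbeq⟩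
      rw [if_neg (by intro hc; rcases hc with hc | hc; exact hin hc; exact hc hmem)]
      have hloe : (functions.filter (fun f => !pvMB category_rules f)).isEmpty = false := by
        cases h' : (functions.filter (fun f => !pvMB category_rules f)).isEmpty
        · rfl
        · exact absurd (List.isEmpty_iff.mp h') hlo
      rw [hbucket]
      simp [hloe, hany]
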